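-- pv_equiv track=rewrite | github.com/tillkaeufer/DuCKLinG | plot_retrieval_results.py | nicer_labels
-- ===== SOURCE A (Python) =====
-- init_abundance={}
--
-- def nicer_labels(init_abundance=init_abundance,with_size=True):
--     labels=list(init_abundance.keys())
--     new_labels=[]
--     for lab in labels:
--         new_lab=''
--         if 'Silica' in lab:
--             new_lab+='Silica '
--         elif 'Fo_Sogawa' in lab or 'Forsterite' in lab or 'Fo_Zeidler' in lab:
--             new_lab+='Forsterite '
--         elif 'En_Jaeger' in lab or 'Enstatite' in lab:
--             new_lab+='Enstatite  '
--         elif 'Mgolivine' in lab or 'MgOlivine' in lab :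
--             new_lab+='Am Mg-olivine '
--         elif 'Olivine' in lab:
--             new_lab+='Olivine '
--         elif 'Mgpyroxene' in lab or 'MgPyroxene' in lab:
--             new_lab+='Am Mg-pyroxene '
--         elif 'Pyroxene' in lab:
--             new_lab+='Pyroxene '
--         elif 'Fayalite' in lab:
--             new_lab+='Fayalite '
--
--         if with_size:
--             idx=lab.find('_rv')
--             rv=lab[idx+3:idx+6]
--             new_lab+=rv
--         new_labels.append(new_lab)
--     return new_labels
-- ===== SOURCE B (Python) =====
-- init_abundance = {}
--
-- _TABLE = [
--     (('Silica',), 'Silica '),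
--     (('Fo_Sogawa', 'Forsterite', 'Fo_Zeidler'), 'Forsterite '),
--     (('En_Jaeger', 'Enstatite'), 'Enstatite  '),
--     (('Mgolivine', 'MgOlivine'), 'Am Mg-olivine '),
--     (('Olivine',), 'Olivine '),
--     (('Mgpyroxene', 'MgPyroxene'), 'Am Mg-pyroxene '),
--     (('Pyroxene',), 'Pyroxene '),
--     (('Fayalite',), 'Fayalite '),
-- ]
--
--
-- def nicer_labels(init_abundance=init_abundance, with_size=True):
--     # Inverted traversal: one pass over ALL labels per table entry (in priority
--     # order), filling only the still-unset slots of a parallel prefix array;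
--     # a final pass appends the size suffix.
--     labels = list(init_abundance)
--     prefixes = [None] * len(labels)
--     for kws, pref in _TABLE:
--         for i, lab in enumerate(labels):
--             if prefixes[i] is None and any(k in lab for k in kws):
--                 prefixes[i] = pref
--     out = []
--     for lab, pref in zip(labels, prefixes):
--         s = '' if pref is None else pref
--         if with_size:
--             idx = lab.find('_rv')
--             s += lab[idx + 3:idx + 6]
--         out.append(s)
--     return out
-- ===== Notes on version B (the rewrite author's own statement) =====
-- stated objective: alternative
-- what changed: Inverts the loop nesting: instead of A's per-label if/elif first-match chain, B makes one pass over all labels per (keywords,prefix) table entry in priority order, filling the still-unset slots of a parallel prefix array, then a separate final pass appends the size suffix.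
import Mathlib
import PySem

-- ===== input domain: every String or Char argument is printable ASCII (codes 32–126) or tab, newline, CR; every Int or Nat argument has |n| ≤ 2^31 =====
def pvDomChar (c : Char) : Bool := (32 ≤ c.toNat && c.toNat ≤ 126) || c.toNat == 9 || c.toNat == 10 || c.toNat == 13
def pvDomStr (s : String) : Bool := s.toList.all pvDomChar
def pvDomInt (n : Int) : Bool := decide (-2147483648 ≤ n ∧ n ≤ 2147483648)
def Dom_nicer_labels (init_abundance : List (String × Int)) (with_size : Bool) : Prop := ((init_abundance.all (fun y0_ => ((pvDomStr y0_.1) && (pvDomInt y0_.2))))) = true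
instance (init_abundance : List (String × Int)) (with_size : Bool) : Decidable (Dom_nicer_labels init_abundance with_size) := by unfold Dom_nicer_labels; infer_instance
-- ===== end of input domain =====

-- B inverts A's loop nesting: one pass over all labels per priority-ordered table entry,
-- filling a parallel array of still-unset prefixes, then a final suffix pass (objective: alternative).


-- ===== PORT A =====
def nicer_labels (init_abundance : List (String × Int)) (with_size : Bool) : List String :=
  let labels := (PySem.Dict.ofList init_abundance).keys
  labels.foldl (fun new_labels lab =>
    let new_lab := ""
    let new_lab :=
      if PySem.Str.isIn "Silica" lab then new_lab ++ "Silica "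
      else if PySem.Str.isIn "Fo_Sogawa" lab || PySem.Str.isIn "Forsterite" lab || PySem.Str.isIn "Fo_Zeidler" lab then new_lab ++ "Forsterite "
      else if PySem.Str.isIn "En_Jaeger" lab || PySem.Str.isIn "Enstatite" lab then new_lab ++ "Enstatite  "
      else if PySem.Str.isIn "Mgolivine" lab || PySem.Str.isIn "MgOlivine" lab then new_lab ++ "Am Mg-olivine "
      else if PySem.Str.isIn "Olivine" lab then new_lab ++ "Olivine "
      else if PySem.Str.isIn "Mgpyroxene" lab || PySem.Str.isIn "MgPyroxene" lab then new_lab ++ "Am Mg-pyroxene "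
      else if PySem.Str.isIn "Pyroxene" lab then new_lab ++ "Pyroxene "
      else if PySem.Str.isIn "Fayalite" lab then new_lab ++ "Fayalite "
      else new_lab
    let new_lab :=
      if with_size then
        let idx := PySem.Str.find lab "_rv"
        new_lab ++ PySem.Str.slice lab (some (idx + 3)) (some (idx + 6))
      else new_lab
    new_labels ++ [new_lab]) []

-- ===== PORT B =====
def pvTable : List (List String × String) :=
  [(["Silica"], "Silica "),
   (["Fo_Sogawa", "Forsterite", "Fo_Zeidler"], "Forsterite "),
   (["En_Jaeger", "Enstatite"], "Enstatite  "),
   (["Mgolivine", "MgOlivine"], "Am Mg-olivine "),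
   (["Olivine"], "Olivine "),
   (["Mgpyroxene", "MgPyroxene"], "Am Mg-pyroxene "),
   (["Pyroxene"], "Pyroxene "),
   (["Fayalite"], "Fayalite ")]

-- one inner pass: 'for i, lab in ...: if prefixes[i] is None and any(...): prefixes[i] = pref'
def pvStep (e : List String × String) (lab : String) (o : Option String) : Option String :=
  if o.isNone && e.1.any (fun k => PySem.Str.isIn k lab) then some e.2 else o

def nicer_labels_alt (init_abundance : List (String × Int)) (with_size : Bool) : List String :=
  let labels := (PySem.Dict.ofList init_abundance).keys
  let prefixes : List (Option String) := labels.map (fun _ => none)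
  let prefixes := pvTable.foldl (fun pr e => (labels.zip pr).map (fun q => pvStep e q.1 q.2)) prefixes
  (labels.zip prefixes).foldl (fun out q =>
    let s := match q.2 with | none => "" | some p => p
    let s :=
      if with_size then
        let idx := PySem.Str.find q.1 "_rv"
        s ++ PySem.Str.slice q.1 (some (idx + 3)) (some (idx + 6))
      else s
    out ++ [s]) []

-- ===== PRECONDITION & SPEC =====
def Spec_nicer_labels (init_abundance : List (String × Int)) (with_size : Bool) (out : List String) : Prop := out = nicer_labels_alt init_abundance with_size
instance (init_abundance : List (String × Int)) (with_size : Bool) (out : List String) : Decidable (Spec_nicer_labels init_abundance with_size out) := by unfold Spec_nicer_labels; infer_instance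

-- ===== CLAIM (what is proved, stated in full; the proofs are below) =====
def Claim_equal_nicer_labels : Prop := ∀ (init_abundance : List (String × Int)) (with_size : Bool), Dom_nicer_labels init_abundance with_size → Spec_nicer_labels init_abundance with_size (nicer_labels init_abundance with_size)

-- ===== LEMMAS AND PROOFS =====

-- zip with a pointwise map over the same zip re-pairs the same labels
theorem pv_zip_map {α β : Type} (labs : List α) (init : List β) (g : α × β → β) :
    labs.zip ((labs.zip init).map g) = (labs.zip init).map (fun q => (q.1, g q)) := by
  induction labs generalizing init with
  | nil => simp
  | cons a labs ih =>
    cases init with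
    | nil => simp
    | cons b init => simp [ih]

-- projecting the second component of a zip with equal lengths gives the list back
theorem pv_zip_snd {α β : Type} (labs : List α) (init : List β) (h : labs.length = init.length) :
    (labs.zip init).map Prod.snd = init := by
  induction labs generalizing init with
  | nil => cases init with
    | nil => simp
    | cons b init => simp at h
  | cons a labs ih =>
    cases init with
    | nil => simp at h
    | cons b init =>
      simp only [List.zip_cons_cons, List.map_cons]
      exact congrArg (b :: ·) (ih init (by simpa using h))

-- the fold over the table of pointwise passes equals a per-element fold of the table
theorem pv_fold_swap {α β : Type} (tbl : List (List String × String))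
    (f : (List String × String) → α → β → β)
    (labs : List α) (init : List β) (h : labs.length = init.length) :
    tbl.foldl (fun pr e => (labs.zip pr).map (fun q => f e q.1 q.2)) init
      = (labs.zip init).map (fun q => tbl.foldl (fun o e => f e q.1 o) q.2) := by
  induction tbl generalizing init with
  | nil => simp [pv_zip_snd labs init h]
  | cons e tbl ih =>
    simp only [List.foldl_cons]
    rw [ih _ (by simp [h]), pv_zip_map, List.map_map]
    exact List.map_congr_left (fun q _ => rfl)

-- zipping a list with a map of itself is a map over the list
theorem pv_zip_map_self {α β : Type} (labs : List α) (h : α → β) :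
    labs.zip (labs.map h) = labs.map (fun a => (a, h a)) := by
  induction labs with
  | nil => simp
  | cons a labs ih => simp [ih]

-- per-label: the priority fold over the concrete table computes A's if/elif chain prefix
theorem pv_prefix_eq (lab : String) :
    (match pvTable.foldl (fun o e => pvStep e lab o) none with | none => "" | some p => p)
      = (if PySem.Str.isIn "Silica" lab then "" ++ "Silica "
        else if PySem.Str.isIn "Fo_Sogawa" lab || PySem.Str.isIn "Forsterite" lab || PySem.Str.isIn "Fo_Zeidler" lab then "" ++ "Forsterite "
        else if PySem.Str.isIn "En_Jaeger" lab || PySem.Str.isIn "Enstatite" lab then "" ++ "Enstatite  "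
        else if PySem.Str.isIn "Mgolivine" lab || PySem.Str.isIn "MgOlivine" lab then "" ++ "Am Mg-olivine "
        else if PySem.Str.isIn "Olivine" lab then "" ++ "Olivine "
        else if PySem.Str.isIn "Mgpyroxene" lab || PySem.Str.isIn "MgPyroxene" lab then "" ++ "Am Mg-pyroxene "
        else if PySem.Str.isIn "Pyroxene" lab then "" ++ "Pyroxene "
        else if PySem.Str.isIn "Fayalite" lab then "" ++ "Fayalite "
        else "") := by
  simp only [pvTable, pvStep, List.foldl_cons, List.foldl_nil, List.any_cons, List.any_nil,
    Bool.or_false]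
  by_cases h1 : PySem.Str.isIn "Silica" lab = true
  · simp [h1, -PySem.Str.isIn_eq]
  ·
    by_cases h2 : PySem.Str.isIn "Fo_Sogawa" lab = true
    · simp [h1, h2, -PySem.Str.isIn_eq]
    ·
      by_cases h3 : PySem.Str.isIn "Forsterite" lab = true
      · simp [h1, h2, h3, -PySem.Str.isIn_eq]
      ·
        by_cases h4 : PySem.Str.isIn "Fo_Zeidler" lab = true
        · simp [h1, h2, h3, h4, -PySem.Str.isIn_eq]
        ·
          by_cases h5 : PySem.Str.isIn "En_Jaeger" lab = true
          · simp [h1, h2, h3, h4, h5, -PySem.Str.isIn_eq]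
          ·
            by_cases h6 : PySem.Str.isIn "Enstatite" lab = true
            · simp [h1, h2, h3, h4, h5, h6, -PySem.Str.isIn_eq]
            ·
              by_cases h7 : PySem.Str.isIn "Mgolivine" lab = true
              · simp [h1, h2, h3, h4, h5, h6, h7, -PySem.Str.isIn_eq]
              ·
                by_cases h8 : PySem.Str.isIn "MgOlivine" lab = true
                · simp [h1, h2, h3, h4, h5, h6, h7, h8, -PySem.Str.isIn_eq]
                ·
                  by_cases h9 : PySem.Str.isIn "Olivine" lab = true
                  · simp [h1, h2, h3, h4, h5, h6, h7, h8, h9, -PySem.Str.isIn_eq]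
                  ·
                    by_cases h10 : PySem.Str.isIn "Mgpyroxene" lab = true
                    · simp [h1, h2, h3, h4, h5, h6, h7, h8, h9, h10, -PySem.Str.isIn_eq]
                    ·
                      by_cases h11 : PySem.Str.isIn "MgPyroxene" lab = true
                      · simp [h1, h2, h3, h4, h5, h6, h7, h8, h9, h10, h11, -PySem.Str.isIn_eq]
                      ·
                        by_cases h12 : PySem.Str.isIn "Pyroxene" lab = true
                        · simp [h1, h2, h3, h4, h5, h6, h7, h8, h9, h10, h11, h12, -PySem.Str.isIn_eq]
                        ·
                          by_cases h13 : PySem.Str.isIn "Fayalite" lab = true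
                          · simp [h1, h2, h3, h4, h5, h6, h7, h8, h9, h10, h11, h12, h13, -PySem.Str.isIn_eq]
                          · simp [h1, h2, h3, h4, h5, h6, h7, h8, h9, h10, h11, h12, h13, -PySem.Str.isIn_eq]


-- ===== VERDICT (by name: the statement is the Claim_ definition above) =====
theorem nicer_labels_spec : Claim_equal_nicer_labels := by
  intro ia ws _
  unfold Spec_nicer_labels
  simp only [nicer_labels, nicer_labels_alt]
  rw [PySem.List.foldl_append_singleton_eq_map, List.nil_append,
      pv_fold_swap pvTable pvStep _ _ (by simp), pv_zip_map_self, List.map_map,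
      pv_zip_map_self, PySem.List.foldl_append_singleton_eq_map, List.nil_append, List.map_map]
  refine List.map_congr_left (fun lab _ => ?_)
  simp only [Function.comp]
  rw [← pv_prefix_eq lab]
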